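-- pv_equiv track=rewrite | github.com/dezgo/diary_sync | note_updater.py | _build_blockquote
-- ===== SOURCE A (Python) =====
-- def _build_blockquote(video_url: str, transcript_text: str) -> str:
--     """Build a complete blockquote block with video link and transcript."""
--     bq_lines = [f"> [Video]({video_url})", "> "]
--     for para in transcript_text.split("\n\n"):
--         para = para.strip()
--         if para:
--             bq_lines.append(f"> {para}")
--             bq_lines.append(">")
--     # Remove trailing empty blockquote line
--     if bq_lines and bq_lines[-1] == ">":
--         bq_lines.pop()
--     return "\n".join(bq_lines)
-- ===== SOURCE B (Python) =====
-- def _build_blockquote(video_url: str, transcript_text: str) -> str: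
--     """Build a complete blockquote block with video link and transcript."""
--     def body(pieces):
--         # build the quoted body back-to-front by recursion on the pieces
--         if not pieces:
--             return ""
--         rest = body(pieces[1:])
--         p = pieces[0].strip()
--         if not p:
--             return rest
--         return "> " + p + ("\n>\n" + rest if rest else "")
--     b = body(transcript_text.split("\n\n"))
--     head = f"> [Video]({video_url})\n> "
--     return head + "\n" + b if b else head
-- ===== Notes on version B (the rewrite author's own statement) =====
-- stated objective: alternative
-- what changed: B builds the quoted body back-to-front by structural recursion on the split pieces, concatenating each stripped paragraph with a separator only when a non-empty tail already exists, instead of A's iterative line-list accumulator with a trailing-separator pop and a final join.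
import Mathlib
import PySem

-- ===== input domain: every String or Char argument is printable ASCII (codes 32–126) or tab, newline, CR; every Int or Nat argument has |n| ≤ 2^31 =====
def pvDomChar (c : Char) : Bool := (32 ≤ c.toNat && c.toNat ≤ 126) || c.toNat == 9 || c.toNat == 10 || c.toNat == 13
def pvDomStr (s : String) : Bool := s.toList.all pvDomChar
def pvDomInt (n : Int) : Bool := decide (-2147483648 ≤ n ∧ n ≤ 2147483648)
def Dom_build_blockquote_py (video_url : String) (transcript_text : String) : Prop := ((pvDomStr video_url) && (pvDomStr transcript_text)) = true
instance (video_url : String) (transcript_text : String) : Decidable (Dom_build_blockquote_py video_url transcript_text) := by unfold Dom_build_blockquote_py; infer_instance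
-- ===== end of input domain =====

-- B builds the quoted body back-to-front by structural recursion on the split pieces (separator added
-- only when a non-empty tail exists), instead of A's line-list accumulator + trailing pop + join (objective: alternative).


-- ===== PORT A =====
def build_blockquote_py (video_url : String) (transcript_text : String) : String :=
  let bq0 : List String := ["> [Video](" ++ video_url ++ ")", "> "]
  let bq := (PySem.Chars.splitOn transcript_text.toList "\n\n".toList).foldl
      (fun acc para =>
        let p := PySem.Chars.strip para
        if p ≠ [] then acc ++ ["> " ++ String.ofList p, ">"] else acc) bq0
  -- Python: `if bq_lines and bq_lines[-1] == ">": bq_lines.pop()`; bq is never [] so getLast? covers both tests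
  let bq := if bq.getLast? = some ">" then bq.dropLast else bq
  PySem.Str.join "\n" bq

-- ===== PORT B =====
-- Source B's inner `body`: recursion on the list of pieces, building the body string back-to-front
def pvBqBody : List (List Char) → String
  | [] => ""
  | x :: xs =>
    let rest := pvBqBody xs
    let p := PySem.Chars.strip x
    if p = [] then rest
    else "> " ++ String.ofList p ++ (if rest ≠ "" then "\n>\n" ++ rest else "")

def build_blockquote_py_alt (video_url : String) (transcript_text : String) : String :=
  let b := pvBqBody (PySem.Chars.splitOn transcript_text.toList "\n\n".toList)
  let head := "> [Video](" ++ video_url ++ ")\n> "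
  if b ≠ "" then head ++ "\n" ++ b else head

-- ===== PRECONDITION & SPEC =====
def Spec_build_blockquote_py (video_url : String) (transcript_text : String) (out : String) : Prop := out = build_blockquote_py_alt video_url transcript_text
instance (video_url : String) (transcript_text : String) (out : String) : Decidable (Spec_build_blockquote_py video_url transcript_text out) := by unfold Spec_build_blockquote_py; infer_instance

-- ===== CLAIM (what is proved, stated in full; the proofs are below) =====
def Claim_equal_build_blockquote_py : Prop := ∀ (video_url : String) (transcript_text : String), Dom_build_blockquote_py video_url transcript_text → Spec_build_blockquote_py video_url transcript_text (build_blockquote_py video_url transcript_text)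

-- ===== LEMMAS AND PROOFS =====

theorem pv_str_ext {a b : String} (h : a.toList = b.toList) : a = b := by
  have := congrArg String.ofList h
  simpa using this

-- the common middle form both ports are reduced to: the filtered stripped paragraphs, joined
def pvParas (t : String) : List (List Char) :=
  ((PySem.Chars.splitOn t.toList "\n\n".toList).map PySem.Chars.strip).filter (· ≠ [])

def pvJoinForm (u t : String) : String :=
  let paras := pvParas t
  let head := "> [Video](" ++ u ++ ")\n> "
  if paras ≠ [] then
    head ++ "\n" ++ PySem.Str.join "\n>\n" (paras.map (fun p => "> " ++ String.ofList p))
  else head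

theorem pv_join_cons_ne (p : List Char) (ps : List (List Char)) :
    PySem.Str.join "\n>\n" ((p :: ps).map (fun q => "> " ++ String.ofList q)) ≠ "" := by
  intro h
  have := congrArg String.toList h
  cases ps <;>
    simp [PySem.Str.toList_join, PySem.Chars.join_singleton, PySem.Chars.join_cons_cons] at this

-- B's recursive body equals the join of the filtered stripped paragraphs
theorem pvBqBody_eq_join (l : List (List Char)) :
    pvBqBody l = PySem.Str.join "\n>\n"
      (((l.map PySem.Chars.strip).filter (· ≠ [])).map (fun p => "> " ++ String.ofList p)) := by
  induction l with
  | nil => rfl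
  | cons x xs ih =>
    have hunf : pvBqBody (x :: xs) =
        (if PySem.Chars.strip x = [] then pvBqBody xs
         else "> " ++ String.ofList (PySem.Chars.strip x) ++
           (if pvBqBody xs ≠ "" then "\n>\n" ++ pvBqBody xs else "")) := rfl
    by_cases h : PySem.Chars.strip x = []
    · simpa [pvBqBody, h, List.filter_cons] using ih
    · cases hf : ((xs.map PySem.Chars.strip).filter (· ≠ [])) with
      | nil =>
        have hrest : pvBqBody xs = "" := by rw [ih, hf]; rfl
        rw [hunf, if_neg h, hrest, if_neg (by simp)]
        simp only [List.map_cons, List.filter_cons, hf]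
        rw [if_pos (by simp [h])]
        apply pv_str_ext
        simp [PySem.Str.toList_join, PySem.Chars.join_singleton]
      | cons q qs =>
        have hrest : pvBqBody xs ≠ "" := by rw [ih, hf]; exact pv_join_cons_ne q qs
        rw [hunf, if_neg h, if_pos hrest, ih]
        simp only [List.map_cons, List.filter_cons, hf]
        rw [if_pos (by simp [h])]
        apply pv_str_ext
        simp [PySem.Str.toList_join, PySem.Chars.join_cons_cons,
          show ("\n>\n" : String).toList = ['\n', '>', '\n'] from rfl]

theorem pv_alt_eq_joinForm (u t : String) :
    build_blockquote_py_alt u t = pvJoinForm u t := by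
  unfold build_blockquote_py_alt pvJoinForm pvParas
  dsimp only
  rw [pvBqBody_eq_join]
  cases hf : ((PySem.Chars.splitOn t.toList "\n\n".toList).map PySem.Chars.strip).filter (· ≠ []) with
  | nil =>
    rw [if_neg (show ¬(PySem.Str.join "\n>\n"
        (List.map (fun p => "> " ++ String.ofList p) ([] : List (List Char))) ≠ "") from
      not_not_intro rfl), if_neg (by simp)]
  | cons q qs => rw [if_pos (pv_join_cons_ne q qs), if_pos (by simp)]

-- A's guarded loop body, flattened: flatMap over the raw split pieces equals flatMap over the
-- filtered stripped paragraphs.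
theorem pv_flatMap_filter (l : List (List Char)) :
    l.flatMap (fun x => if PySem.Chars.strip x ≠ [] then
        ["> " ++ String.ofList (PySem.Chars.strip x), ">"] else []) =
    ((l.map PySem.Chars.strip).filter (· ≠ [])).flatMap
        (fun p => ["> " ++ String.ofList p, ">"]) := by
  induction l with
  | nil => rfl
  | cons x xs ih =>
    by_cases h : PySem.Chars.strip x = [] <;>
      simpa [List.flatMap_cons, List.filter_cons, h] using ih

theorem pv_getLast?_flat (p : List Char) (ps : List (List Char)) :
    (((p :: ps).flatMap (fun q => ["> " ++ String.ofList q, (">" : String)]))).getLast? =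
      some ">" := by
  induction ps generalizing p with
  | nil => rfl
  | cons q rest ih => simpa [List.flatMap_cons] using ih q

theorem pv_toList_line (q : List Char) :
    (("> " ++ String.ofList q : String)).toList = '>' :: ' ' :: q := by simp

theorem pv_mapflat (p : List Char) (ps : List (List Char)) :
    List.map String.toList
        ((p :: ps).flatMap (fun q => ["> " ++ String.ofList q, (">" : String)])) =
      (p :: ps).flatMap (fun q => ['>' :: ' ' :: q, ['>']]) := by
  induction ps generalizing p with
  | nil => simp
  | cons q rest ih => simpa [List.flatMap_cons] using ih q

theorem pv_joinMain (ps : List (List Char)) (p : List Char) :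
    PySem.Chars.join ['\n']
        (List.dropLast ((p :: ps).flatMap (fun q => ['>' :: ' ' :: q, ['>']]))) =
    PySem.Chars.join ['\n', '>', '\n'] ((p :: ps).map (fun q => '>' :: ' ' :: q)) := by
  induction ps generalizing p with
  | nil => simp [PySem.Chars.join_singleton]
  | cons q rest ih =>
    have hd : List.dropLast ((p :: q :: rest).flatMap (fun r => ['>' :: ' ' :: r, ['>']])) =
        ('>' :: ' ' :: p) :: ['>'] ::
          List.dropLast ((q :: rest).flatMap (fun r => ['>' :: ' ' :: r, ['>']])) := by
      simp [List.flatMap_cons, List.dropLast_cons_of_ne_nil]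
    have hd2 : List.dropLast ((q :: rest).flatMap (fun r => ['>' :: ' ' :: r, ['>']])) =
        ('>' :: ' ' :: q) ::
          List.dropLast (['>'] :: rest.flatMap (fun r => ['>' :: ' ' :: r, ['>']])) := by
      simp [List.flatMap_cons, List.dropLast_cons_of_ne_nil]
    rw [hd, PySem.Chars.join_cons_cons, hd2, PySem.Chars.join_cons_cons, ← hd2, ih q]
    simp [PySem.Chars.join_cons_cons, List.append_assoc]

theorem pv_A_eq_joinForm (u t : String) :
    build_blockquote_py u t = pvJoinForm u t := by
  unfold build_blockquote_py pvJoinForm pvParas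
  dsimp only
  have hfold : ∀ (l : List (List Char)) (acc : List String),
      l.foldl (fun acc para =>
          let p := PySem.Chars.strip para
          if p ≠ [] then acc ++ ["> " ++ String.ofList p, ">"] else acc) acc
        = acc ++ l.flatMap (fun x => if PySem.Chars.strip x ≠ [] then
            ["> " ++ String.ofList (PySem.Chars.strip x), ">"] else []) := by
    intro l
    induction l with
    | nil => intro acc; simp
    | cons x xs ih =>
      intro acc
      by_cases h : PySem.Chars.strip x = []
      · simpa [List.foldl_cons, List.flatMap_cons, h] using ih acc
      · simpa [List.foldl_cons, List.flatMap_cons, h] using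
          ih (acc ++ ["> " ++ String.ofList (PySem.Chars.strip x), ">"])
  rw [hfold, pv_flatMap_filter]
  cases hP : ((PySem.Chars.splitOn t.toList "\n\n".toList).map
      PySem.Chars.strip).filter (· ≠ []) with
  | nil =>
    simp only [List.flatMap_nil, List.append_nil]
    rw [if_neg (by simp), if_neg (by simp)]
    apply pv_str_ext
    simp [PySem.Str.toList_join, PySem.Chars.join_cons_cons, PySem.Chars.join_singleton,
      show ("\n" : String).toList = ['\n'] from rfl]
  | cons p ps =>
    have hflatne : ((p :: ps).flatMap
        (fun q => ["> " ++ String.ofList q, (">" : String)])) ≠ [] := by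
      simp [List.flatMap_cons]
    rw [if_pos (by
      rw [List.getLast?_append_of_ne_nil _ hflatne]
      exact pv_getLast?_flat p ps)]
    rw [List.dropLast_append_of_ne_nil hflatne, if_pos (by simp)]
    apply pv_str_ext
    rw [PySem.Str.toList_join]
    simp only [List.map_cons, List.map_dropLast,
      pv_mapflat, List.nil_append, List.cons_append]
    have hdropne : List.dropLast ((p :: ps).flatMap
        (fun q => ['>' :: ' ' :: q, ['>']])) =
        ('>' :: ' ' :: p) ::
          List.dropLast (['>'] :: ps.flatMap (fun q => ['>' :: ' ' :: q, ['>']])) := by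
      simp [List.flatMap_cons, List.dropLast_cons_of_ne_nil]
    rw [show ("\n" : String).toList = ['\n'] from rfl,
      PySem.Chars.join_cons_cons, hdropne, PySem.Chars.join_cons_cons, ← hdropne,
      pv_joinMain ps p]
    simp [PySem.Str.toList_join, List.map_map,
      show ("\n>\n" : String).toList = ['\n', '>', '\n'] from rfl,
      show (")\n> " : String).toList = [')', '\n', '>', ' '] from rfl,
      show ("> " : String).toList = ['>', ' '] from rfl,
      List.append_assoc]
    rw [show (String.toList ∘ fun p : List Char => ("> " ++ String.ofList p : String)) =
        fun q => '>' :: ' ' :: q from funext pv_toList_line]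

-- ===== VERDICT (by name: the statement is the Claim_ definition above) =====
theorem build_blockquote_py_spec : Claim_equal_build_blockquote_py := by
  intro u t _
  show build_blockquote_py u t = build_blockquote_py_alt u t
  rw [pv_A_eq_joinForm, pv_alt_eq_joinForm]
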